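-- pv_equiv track=rewrite | github.com/Rohan3011/CSES-Problemset | python/sorting-and-searching/concert-tickets.py | concert_tickets
-- ===== SOURCE A (Python) =====
-- import bisect
--
-- def concert_tickets(prices, max_prices):
--     prices.sort()  # Sort the prices initially
--     result = []
--     for max_price in max_prices:
--         # Find the index of the largest ticket price <= max_price
--         idx = bisect.bisect_right(prices, max_price) - 1
--         if idx == -1:
--             result.append(-1)
--         else:
--             result.append(prices[idx])
--             prices.pop(idx)  # Remove the ticket price
--     return result
-- ===== SOURCE B (Python) =====
-- import bisect
--
--
-- def concert_tickets(prices, max_prices):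
--     # Sorted ticket prices stay in a fixed array that is never modified; sold
--     # tickets are skipped via a union-find "nearest available slot to the left"
--     # pointer array with path compression, instead of removing entries from a
--     # shrinking sorted list as A does.
--     # (Unlike A, this does not mutate the caller's `prices` list.)
--     sp = sorted(prices)
--     # parent[j]: slot j stands for ticket index j - 1; slot 0 means "no ticket".
--     # parent[j] == j  <=>  slot j is still available; otherwise parent[j] links
--     # toward the nearest available slot to the left.
--     parent = list(range(len(sp) + 1))
--     result = []
--     for m in max_prices:
--         j = bisect.bisect_right(sp, m)
--         root = j
--         while parent[root] != root:
--             root = parent[root]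
--         while parent[j] != root:  # path compression
--             parent[j], j = root, parent[j]
--         if root == 0:
--             result.append(-1)
--         else:
--             result.append(sp[root - 1])
--             parent[root] = root - 1
--     return result
-- ===== Notes on version B (the rewrite author's own statement) =====
-- stated objective: alternative
-- what changed: A keeps the remaining tickets in a shrinking sorted Python list and removes each sold ticket with list.pop; B bisects into a fixed sorted array that is never modified and skips sold tickets with a union-find 'nearest available slot to the left' parent array with path compression.
import Mathlib
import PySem

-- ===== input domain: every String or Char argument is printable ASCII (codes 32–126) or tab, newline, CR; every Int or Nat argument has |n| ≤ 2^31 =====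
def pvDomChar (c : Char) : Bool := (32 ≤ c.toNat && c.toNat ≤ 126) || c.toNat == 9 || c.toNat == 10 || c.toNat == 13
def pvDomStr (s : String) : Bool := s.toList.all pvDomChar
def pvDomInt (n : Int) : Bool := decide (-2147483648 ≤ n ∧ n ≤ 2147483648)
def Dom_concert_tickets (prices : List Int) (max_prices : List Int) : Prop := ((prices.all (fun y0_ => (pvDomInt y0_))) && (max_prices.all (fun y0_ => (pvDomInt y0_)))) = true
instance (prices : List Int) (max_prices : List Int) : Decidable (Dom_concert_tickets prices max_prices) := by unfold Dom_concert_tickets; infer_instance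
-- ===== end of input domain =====

-- B replaces A's sorted-list + list.pop bookkeeping by a fixed sorted array with a
-- union-find "nearest available slot to the left" pointer array (path compression):
-- same return value, different algorithm. A mutates its `prices` argument (sort/pop),
-- B does not; the equivalence proved here is about the RETURN value only.

-- ===== PORT A =====
def concert_tickets (prices : List Int) (max_prices : List Int) : List Int :=
  -- prices.sort()
  let ps := PySem.List.sorted prices (fun x => x) false
  (max_prices.foldl (fun (st : List Int × List Int) m =>
    -- idx = bisect.bisect_right(prices, max_price) - 1
    let idx : Int := (PySem.List.bisectRight st.1 m : Int) - 1
    if idx = -1 then (st.1, st.2 ++ [-1])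
    else
      -- result.append(prices[idx]); prices.pop(idx)  — pop? returns both; idx is
      -- always in range here (bisect_right ≥ 1), so the none branch is unreachable
      match PySem.List.pop? st.1 idx with
      | some r => (r.2, st.2 ++ [r.1])
      | none => (st.1, st.2 ++ [-1])
  ) (ps, [])).2

-- ===== PORT B =====
-- while parent[root] != root: root = parent[root]   (fuel = len(parent) suffices:
-- the walk strictly decreases; parent[root] is always in range, default unreachable)
def findRootAux (parent : List Int) (root : Int) : Nat → Int
  | 0 => root
  | fuel+1 =>
    let p := PySem.List.pyGetD parent root root
    if p ≠ root then findRootAux parent p fuel else root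

-- while parent[j] != root: parent[j], j = root, parent[j]
def compressAux (parent : List Int) (j root : Int) : Nat → List Int
  | 0 => parent
  | fuel+1 =>
    let p := PySem.List.pyGetD parent j j
    if p ≠ root then compressAux (PySem.List.pySetD parent j root) p root fuel else parent

def concert_tickets_alt (prices : List Int) (max_prices : List Int) : List Int :=
  let sp := PySem.List.sorted prices (fun x => x) false
  -- parent = list(range(len(sp) + 1))
  let parent0 := PySem.List.pyRange 0 ((sp.length : Int) + 1) 1
  (max_prices.foldl (fun (st : List Int × List Int) m =>
    let parent := st.1
    let j : Int := (PySem.List.bisectRight sp m : Int)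
    let root := findRootAux parent j parent.length
    let parent := compressAux parent j root parent.length
    if root = 0 then (parent, st.2 ++ [-1])
    else
      -- result.append(sp[root - 1]); parent[root] = root - 1   (root-1 in range)
      let v := PySem.List.pyGetD sp (root - 1) 0
      (PySem.List.pySetD parent root (root - 1), st.2 ++ [v])
  ) (parent0, [])).2

-- ===== PRECONDITION & SPEC =====
def Spec_concert_tickets (prices : List Int) (max_prices : List Int) (out : List Int) : Prop := out = concert_tickets_alt prices max_prices
instance (prices : List Int) (max_prices : List Int) (out : List Int) : Decidable (Spec_concert_tickets prices max_prices out) := by unfold Spec_concert_tickets; infer_instance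

-- ===== CLAIM (what is proved, stated in full; the proofs are below) =====
def Claim_equal_concert_tickets : Prop := ∀ (prices : List Int) (max_prices : List Int), Dom_concert_tickets prices max_prices → Spec_concert_tickets prices max_prices (concert_tickets prices max_prices)

-- ===== LEMMAS AND PROOFS =====

-- `parent[i]` as a total Nat-indexed read (proof-side only; in range whenever used).
def pAt (parent : List Int) (i : Nat) : Int := parent.getD i 0

-- Largest "available" slot ≤ j (slot i is available iff parent[i] = i).
def muS (parent : List Int) : Nat → Nat
  | 0 => 0
  | j+1 => if pAt parent (j+1) = ((j:Int)+1) then j+1 else muS parent j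

-- The union-find invariant, relative to n = sp.length (parent has n+1 slots).
def UFInv (n : Nat) (parent : List Int) : Prop :=
  parent.length = n + 1 ∧
  ∀ i : Nat, i ≤ n → 0 ≤ pAt parent i ∧ pAt parent i ≤ (i : Int) ∧
    (pAt parent i < (i : Int) → muS parent (pAt parent i).toNat = muS parent i)

-- Tickets still available, in ascending order (A's remaining list, reconstructed).
def remOf (sp : List Int) (parent : List Int) : List Int :=
  ((List.range sp.length).filter (fun i => pAt parent (i+1) = ((i:Int)+1))).map
    (fun i => sp.getD i 0)

theorem pAt_set_self (parent : List Int) (i : Nat) (v : Int) (h : i < parent.length) :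
    pAt (parent.set i v) i = v := by
  simp [pAt, List.getD, h]

theorem pAt_set_ne (parent : List Int) (i k : Nat) (v : Int) (h : i ≠ k) :
    pAt (parent.set k v) i = pAt parent i := by
  simp [pAt, List.getD, List.getElem?_set_ne (by omega : k ≠ i)]

theorem pAt_lt_length (parent : List Int) (i : Nat) (h : i < parent.length) (d : Int) :
    parent.getD i d = pAt parent i := by
  simp [pAt, List.getD, List.getElem?_eq_getElem h]

theorem muS_le (parent : List Int) (j : Nat) : muS parent j ≤ j := by
  induction j with
  | zero => simp [muS]
  | succ j ih => simp only [muS]; split <;> omega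

theorem muS_avail (parent : List Int) (h0 : pAt parent 0 = 0) (j : Nat) :
    pAt parent (muS parent j) = (muS parent j : Int) := by
  induction j with
  | zero => simpa [muS] using h0
  | succ j ih =>
    simp only [muS]
    split
    · next h => rw [h]; push_cast; ring
    · exact ih

theorem muS_eq_of_avail (parent : List Int) (j : Nat) (h : pAt parent j = (j:Int)) :
    muS parent j = j := by
  cases j with
  | zero => simp [muS]
  | succ j =>
    simp only [muS]
    rw [if_pos]
    rw [h]; push_cast; ring

theorem le_muS_of_avail (parent : List Int) (i j : Nat) (hij : i ≤ j)
    (h : pAt parent i = (i:Int)) : i ≤ muS parent j := by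
  induction j with
  | zero => simp [muS]; omega
  | succ j ih =>
    simp only [muS]
    split
    · omega
    · next hna =>
      by_cases hi : i = j + 1
      · exfalso; apply hna; rw [← hi, h, hi]; push_cast; ring
      · exact ih (by omega)

theorem muS_congr (p q : List Int) (j : Nat)
    (h : ∀ i, i ≤ j → (pAt p i = (i:Int) ↔ pAt q i = (i:Int))) : muS p j = muS q j := by
  induction j with
  | zero => rfl
  | succ j ih =>
    have hh := h (j+1) (le_refl _)
    push_cast at hh
    simp only [muS]
    by_cases h1 : pAt p (j+1) = (j:Int)+1
    · rw [if_pos h1, if_pos (hh.mp h1)]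
    · rw [if_neg h1, if_neg (fun hq => h1 (hh.mpr hq))]
      exact ih (fun i hi => h i (by omega))

theorem findRootAux_eq (n : Nat) (parent : List Int) (hInv : UFInv n parent) :
    ∀ (fuel j : Nat), j ≤ n → j < fuel →
      findRootAux parent (j:Int) fuel = (muS parent j : Int) := by
  intro fuel
  induction fuel with
  | zero => intro j _ hf; omega
  | succ fuel ih =>
    intro j hj hf
    obtain ⟨hlen, hb⟩ := hInv
    obtain ⟨h0, h1, h2⟩ := hb j hj
    have hjlt : j < parent.length := by omega
    simp only [findRootAux, PySem.List.pyGetD_natCast, pAt_lt_length parent j hjlt]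
    by_cases hcase : pAt parent j = (j:Int)
    · rw [if_neg (by simp [hcase])]
      rw [muS_eq_of_avail parent j hcase]
    · rw [if_pos (by simp [hcase])]
      have hplt : pAt parent j < (j:Int) := lt_of_le_of_ne h1 hcase
      rw [show pAt parent j = (((pAt parent j).toNat : Nat) : Int) from
        (Int.toNat_of_nonneg h0).symm]
      rw [ih (pAt parent j).toNat (by omega) (by omega)]
      rw [h2 hplt]

theorem compress_spec (n root : Nat) :
    ∀ (fuel j : Nat) (parent : List Int), UFInv n parent → j ≤ n → j < fuel →
      muS parent j = root →
      UFInv n (compressAux parent (j:Int) (root:Int) fuel) ∧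
      ∀ i, i ≤ n →
        (pAt (compressAux parent (j:Int) (root:Int) fuel) i = (i:Int) ↔
          pAt parent i = (i:Int)) := by
  intro fuel
  induction fuel with
  | zero => intro j parent _ _ hf; omega
  | succ fuel ih =>
    intro j parent hInv hj hf hmu
    have hlen := hInv.1
    have hjlt : j < parent.length := by omega
    have h0 : pAt parent 0 = 0 := by
      obtain ⟨a, b, _⟩ := hInv.2 0 (by omega); omega
    simp only [compressAux, PySem.List.pyGetD_natCast, pAt_lt_length parent j hjlt]
    by_cases hcase : pAt parent j = (root:Int)
    · rw [if_neg (by simp [hcase])]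
      exact ⟨hInv, fun i _ => Iff.rfl⟩
    · rw [if_pos (by simp [hcase])]
      obtain ⟨hp0, hp1, hp2⟩ := hInv.2 j hj
      have hjna : pAt parent j ≠ (j:Int) := by
        intro hav
        exact hcase (by rw [hav, ← hmu, muS_eq_of_avail parent j hav])
      have hplt : pAt parent j < (j:Int) := lt_of_le_of_ne hp1 hjna
      have hrootle : root ≤ j := hmu ▸ muS_le parent j
      have hrootlt : root < j := by
        rcases lt_or_eq_of_le hrootle with h | h
        · exact h
        · exfalso
          apply hjna
          have := muS_avail parent h0 j
          rw [hmu, h] at this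
          simpa [h] using this
      simp only [PySem.List.pySetD_natCast]
      set q := parent.set j (root:Int) with hq
      have havail_iff : ∀ i, i ≤ n → (pAt q i = (i:Int) ↔ pAt parent i = (i:Int)) := by
        intro i hi
        by_cases hij : i = j
        · subst hij
          rw [pAt_set_self parent i (root:Int) (by omega)]
          constructor
          · intro h; exfalso; omega
          · intro h; exact absurd h hjna
        · rw [pAt_set_ne parent i j (root:Int) hij]
      have hmuq : ∀ l, l ≤ n → muS q l = muS parent l :=
        fun l hl => muS_congr q parent l (fun i hi => havail_iff i (le_trans hi hl))
      have havr : pAt parent root = (root:Int) := by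
        have := muS_avail parent h0 j
        rwa [hmu] at this
      have hInvq : UFInv n q := by
        refine ⟨by simp [hq, hlen], ?_⟩
        intro i hi
        by_cases hij : i = j
        · subst hij
          rw [pAt_set_self parent i (root:Int) (by omega)]
          refine ⟨by omega, by omega, ?_⟩
          intro _
          rw [show ((root:Int)).toNat = root from by omega]
          rw [hmuq root (by omega), hmuq i hi, hmu]
          exact muS_eq_of_avail parent root havr
        · rw [pAt_set_ne parent i j (root:Int) hij]
          obtain ⟨a, b, c⟩ := hInv.2 i hi
          refine ⟨a, b, fun hlt' => ?_⟩
          rw [hmuq _ (by omega), hmuq i hi]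
          exact c hlt'
      have hpn : (pAt parent j).toNat ≤ n := by omega
      have hpf : (pAt parent j).toNat < fuel := by omega
      have hmup : muS q (pAt parent j).toNat = root := by
        rw [hmuq _ hpn, hp2 hplt, hmu]
      rw [show pAt parent j = (((pAt parent j).toNat : Nat) : Int) from
        (Int.toNat_of_nonneg hp0).symm]
      obtain ⟨hr1, hr2⟩ := ih (pAt parent j).toNat q hInvq hpn hpf hmup
      exact ⟨hr1, fun i hi => (hr2 i hi).trans (havail_iff i hi)⟩

theorem muS_set_used (n : Nat) (parent : List Int) (hInv : UFInv n parent) (r : Nat)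
    (hr1 : 1 ≤ r) (hrn : r ≤ n) (havail : pAt parent r = (r:Int)) :
    ∀ k, k ≤ n → muS (parent.set r ((r:Int)-1)) k =
      if muS parent k = r then muS parent (r-1) else muS parent k := by
  have hlen := hInv.1
  intro k
  induction k with
  | zero =>
    intro _
    simp only [muS]
    rw [if_neg (by omega)]
  | succ k ih =>
    intro hk
    by_cases hkr : k + 1 = r
    · subst hkr
      rw [if_pos (muS_eq_of_avail parent (k+1) havail)]
      have h1 : muS (parent.set (k+1) (((k+1 : Nat) : Int) - 1)) (k+1)
          = muS (parent.set (k+1) (((k+1 : Nat) : Int) - 1)) k := by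
        simp only [muS]
        rw [if_neg (by rw [pAt_set_self parent (k+1) _ (by omega)]; push_cast; omega)]
      rw [h1, ih (by omega)]
      rw [if_neg (by have := muS_le parent k; omega)]
      congr 1
    · simp only [muS]
      rw [pAt_set_ne parent (k+1) r ((r:Int)-1) hkr]
      by_cases hav : pAt parent (k+1) = (k:Int)+1
      · rw [if_pos hav, if_pos hav, if_neg (by omega)]
      · rw [if_neg hav, if_neg hav]
        exact ih (by omega)

theorem UFInv_set_used (n : Nat) (parent : List Int) (hInv : UFInv n parent) (r : Nat)
    (hr1 : 1 ≤ r) (hrn : r ≤ n) (havail : pAt parent r = (r:Int)) :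
    UFInv n (parent.set r ((r:Int)-1)) := by
  have hlen := hInv.1
  have hmu := muS_set_used n parent hInv r hr1 hrn havail
  refine ⟨by simp [hlen], ?_⟩
  intro i hi
  by_cases hir : i = r
  · subst hir
    rw [pAt_set_self parent i ((i:Int)-1) (by omega)]
    refine ⟨by omega, by omega, ?_⟩
    intro _
    rw [show (((i:Int))-1).toNat = i - 1 from by omega]
    rw [hmu (i-1) (by omega), hmu i hi]
    rw [if_pos (muS_eq_of_avail parent i havail)]
    rw [if_neg (by have := muS_le parent (i-1); omega)]
  · rw [pAt_set_ne parent i r ((r:Int)-1) hir]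
    obtain ⟨a, b, c⟩ := hInv.2 i hi
    refine ⟨a, b, fun hlt' => ?_⟩
    rw [hmu _ (by omega), hmu i hi, c hlt']

theorem avail_set_used (parent : List Int) (r : Nat) (hr1 : 1 ≤ r)
    (hrlt : r < parent.length) :
    ∀ i : Nat, (pAt (parent.set r ((r:Int)-1)) i = (i:Int) ↔
      (pAt parent i = (i:Int) ∧ i ≠ r)) := by
  intro i
  by_cases hir : i = r
  · subst hir
    rw [pAt_set_self parent i ((i:Int)-1) hrlt]
    constructor
    · intro h; exfalso; omega
    · intro h; exact absurd rfl h.2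
  · rw [pAt_set_ne parent i r ((r:Int)-1) hir]
    exact ⟨fun h => ⟨h, hir⟩, fun h => h.1⟩

theorem bisectRight_eq_of (xs : List Int) (m : Int) (hs : xs.Pairwise (· ≤ ·)) (c : Nat)
    (hcl : c ≤ xs.length) (h1 : ∀ (j : Nat) (hj : j < xs.length), j < c → xs[j] ≤ m)
    (h2 : ∀ (j : Nat) (hj : j < xs.length), c ≤ j → m < xs[j]) :
    PySem.List.bisectRight xs m = c := by
  obtain ⟨hb, hb1, hb2⟩ := PySem.List.bisectRight_spec xs m hs
  set b := PySem.List.bisectRight xs m with hbdef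
  rcases lt_trichotomy b c with h | h | h
  · have hblt : b < xs.length := by omega
    have := h1 b hblt h
    have := hb2 b hblt (le_refl _)
    omega
  · exact h
  · have hclt : c < xs.length := by omega
    have := hb1 c hclt h
    have := h2 c hclt (le_refl _)
    omega

theorem pairwise_getElem_le (xs : List Int) (hs : xs.Pairwise (· ≤ ·)) (i j : Nat)
    (hij : i ≤ j) (hj : j < xs.length) : xs[i]'(by omega) ≤ xs[j] := by
  rcases lt_or_eq_of_le hij with h | h
  · exact List.pairwise_iff_getElem.mp hs i j (by omega) hj h
  · subst h; exact le_refl _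

theorem sorted_dropWhile_ge (K : Nat) :
    ∀ (l : List Nat), l.Pairwise (· < ·) →
      ∀ x ∈ l.dropWhile (fun i => decide (i < K)), K ≤ x := by
  intro l
  induction l with
  | nil => intro _ x hx; simp [List.dropWhile] at hx
  | cons a t ih =>
    intro hp x hx
    rw [List.dropWhile_cons] at hx
    by_cases ha : a < K
    · rw [if_pos (by simpa using ha)] at hx
      exact ih (List.Pairwise.of_cons hp) x hx
    · rw [if_neg (by simpa using ha)] at hx
      rcases List.mem_cons.mp hx with h | h
      · omega
      · have := (List.pairwise_cons.mp hp).1 x h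
        omega

theorem step_sim (sp parent : List Int) (hsp : sp.Pairwise (· ≤ ·))
    (hInv : UFInv sp.length parent) (m : Int) :
    (muS parent (PySem.List.bisectRight sp m) = 0 →
      PySem.List.bisectRight (remOf sp parent) m = 0) ∧
    (1 ≤ muS parent (PySem.List.bisectRight sp m) →
      1 ≤ PySem.List.bisectRight (remOf sp parent) m ∧
      PySem.List.pop? (remOf sp parent)
          ((PySem.List.bisectRight (remOf sp parent) m : Int) - 1) =
        some (sp.getD (muS parent (PySem.List.bisectRight sp m) - 1) 0,
          remOf sp (parent.set (muS parent (PySem.List.bisectRight sp m))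
            ((muS parent (PySem.List.bisectRight sp m) : Int) - 1)))) := by
  set n := sp.length with hn
  obtain ⟨hKn, hKle, hKgt⟩ := PySem.List.bisectRight_spec sp m hsp
  set K := PySem.List.bisectRight sp m with hKdef
  have h0 : pAt parent 0 = 0 := by obtain ⟨a, b, _⟩ := hInv.2 0 (by omega); omega
  have hplen : parent.length = n + 1 := hInv.1
  set P : Nat → Bool := fun i => decide (pAt parent (i+1) = ((i:Int)+1)) with hP
  set f : Nat → Int := fun i => sp.getD i 0 with hf
  set idxs := (List.range n).filter P with hidxs
  have hrem : remOf sp parent = idxs.map f := by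
    rw [hidxs, hP, hf, hn]; rfl
  set tw := idxs.takeWhile (fun i => decide (i < K)) with htwdef
  set dw := idxs.dropWhile (fun i => decide (i < K)) with hdwdef
  have hsplit : tw ++ dw = idxs := List.takeWhile_append_dropWhile
  have hpair : idxs.Pairwise (· < ·) := by
    rw [hidxs]; exact List.Pairwise.filter _ List.pairwise_lt_range
  have hmem_idxs : ∀ x ∈ idxs, x < n ∧ pAt parent (x+1) = ((x:Int)+1) := by
    intro x hx
    rw [hidxs, List.mem_filter, List.mem_range] at hx
    exact ⟨hx.1, by simpa [hP] using hx.2⟩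
  have htw_lt : ∀ x ∈ tw, x < K := by
    intro x hx; simpa using List.mem_takeWhile_imp hx
  have htw_sub : ∀ x ∈ tw, x ∈ idxs := by
    intro x hx; rw [← hsplit]; exact List.mem_append_left _ hx
  have hdw_ge : ∀ x ∈ dw, K ≤ x := by
    rw [hdwdef]; exact sorted_dropWhile_ge K idxs hpair
  have hremsplit : remOf sp parent = tw.map f ++ dw.map f := by
    rw [hrem, ← hsplit, List.map_append]
  have hidx_lt : ∀ x ∈ idxs, x < n := fun x hx => (hmem_idxs x hx).1
  have hremsorted : (remOf sp parent).Pairwise (· ≤ ·) := by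
    rw [hrem, List.pairwise_map]
    refine List.Pairwise.imp_of_mem ?_ hpair
    intro a b ha hb hab
    rw [hf]
    simp only
    rw [List.getD_eq_getElem sp 0 (show a < sp.length by rw [← hn]; exact hidx_lt a ha),
        List.getD_eq_getElem sp 0 (show b < sp.length by rw [← hn]; exact hidx_lt b hb)]
    exact pairwise_getElem_le sp hsp a b (le_of_lt hab) _
  have hlenrem0 : (remOf sp parent).length = idxs.length := by rw [hrem]; simp
  have hlensplit : idxs.length = tw.length + dw.length := by rw [← hsplit]; simp
  have hk : PySem.List.bisectRight (remOf sp parent) m = tw.length := by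
    apply bisectRight_eq_of _ _ hremsorted
    · omega
    · intro j hj hjc
      have hj' : j < (List.map f tw).length := by simpa using hjc
      have hge : (remOf sp parent)[j] = f (tw[j]'(by simpa using hjc)) := by
        rw [List.getElem_of_eq hremsplit hj, List.getElem_append_left hj', List.getElem_map]
      rw [hge, hf]
      simp only
      have hmem : tw[j]'(by simpa using hjc) ∈ tw := List.getElem_mem _
      have h1 := htw_lt _ hmem
      have h2 := hidx_lt _ (htw_sub _ hmem)
      rw [List.getD_eq_getElem sp 0 (show _ < sp.length by rw [← hn]; exact h2)]
      exact hKle _ _ h1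
    · intro j hj hjc
      have hjlen : j < idxs.length := by omega
      have hjd : j - tw.length < dw.length := by omega
      have hjd' : j - (List.map f tw).length < (List.map f dw).length := by simpa using hjd
      have hge : (remOf sp parent)[j] = f (dw[j - tw.length]'hjd) := by
        rw [List.getElem_of_eq hremsplit hj, List.getElem_append_right (by simpa using hjc)]
        simp [List.getElem_map]
      rw [hge, hf]
      simp only
      have hmem : dw[j - tw.length]'hjd ∈ dw := List.getElem_mem _
      have h1 := hdw_ge _ hmem
      have h2 : dw[j - tw.length]'hjd ∈ idxs := by
        rw [← hsplit]; exact List.mem_append_right _ hmem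
      have h3 := hidx_lt _ h2
      rw [List.getD_eq_getElem sp 0 (show _ < sp.length by rw [← hn]; exact h3)]
      exact hKgt _ _ h1
  constructor
  · intro hr0
    rw [hk]
    by_cases htwe : tw = []
    · simp [htwe]
    · exfalso
      obtain ⟨a, ha⟩ := List.exists_mem_of_ne_nil tw htwe
      have h1 := htw_lt a ha
      have h2 := (hmem_idxs a (htw_sub a ha)).2
      have h3 : a + 1 ≤ muS parent K :=
        le_muS_of_avail parent (a+1) K (by omega) (by rw [h2]; push_cast; ring)
      omega
  · intro hr1
    set r := muS parent K with hrdef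
    have havailr : pAt parent r = (r:Int) := muS_avail parent h0 K
    have hrK : r ≤ K := muS_le parent K
    have hrn : r ≤ n := le_trans hrK hKn
    have htmem : (r-1) ∈ idxs := by
      rw [hidxs, List.mem_filter, List.mem_range]
      refine ⟨by omega, ?_⟩
      simp only [hP, decide_eq_true_eq]
      rw [show r - 1 + 1 = r from by omega, havailr]
      omega
    have htw_t : (r-1) ∈ tw := by
      rcases List.mem_append.mp (by rw [hsplit]; exact htmem :
          (r-1) ∈ tw ++ dw) with h | h
      · exact h
      · have := hdw_ge _ h; omega
    have htwne : tw ≠ [] := List.ne_nil_of_mem htw_t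
    have hmax : ∀ x ∈ tw, x ≤ r - 1 := by
      intro x hx
      have hxK := htw_lt x hx
      have hxa := (hmem_idxs x (htw_sub x hx)).2
      have : x + 1 ≤ r :=
        le_muS_of_avail parent (x+1) K (by omega) (by rw [hxa]; push_cast; ring)
      omega
    have hptw : tw.Pairwise (· < ·) :=
      List.Pairwise.sublist (List.takeWhile_sublist _) hpair
    have hdec := List.dropLast_concat_getLast htwne
    have hptw' : (tw.dropLast ++ [tw.getLast htwne]).Pairwise (· < ·) := by
      rw [hdec]; exact hptw
    have hlast : tw.getLast htwne = r - 1 := by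
      refine le_antisymm (hmax _ (List.getLast_mem htwne)) ?_
      have hx : (r-1) ∈ tw.dropLast ++ [tw.getLast htwne] := by rw [hdec]; exact htw_t
      rcases List.mem_append.mp hx with h | h
      · have := (List.pairwise_append.mp hptw').2.2 _ h _ (List.mem_singleton_self _)
        omega
      · rw [List.mem_singleton] at h; omega
    have hk1 : 1 ≤ tw.length := List.length_pos_of_ne_nil htwne
    refine ⟨by rw [hk]; omega, ?_⟩
    rw [hk]
    rw [show ((tw.length : Int) - 1) = ((tw.length - 1 : Nat) : Int) from by omega]
    have hlenrem : tw.length - 1 < (remOf sp parent).length := by omega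
    rw [PySem.List.pop?_natCast _ _ hlenrem]
    have h1 : tw.length - 1 < (List.map f tw).length := by simp; omega
    have hval : (remOf sp parent)[tw.length - 1]'hlenrem = sp.getD (r-1) 0 := by
      rw [List.getElem_of_eq hremsplit hlenrem, List.getElem_append_left h1, List.getElem_map]
      have e : tw[tw.length-1]'(by simpa using h1) = r - 1 := by
        rw [← List.getLast_eq_getElem htwne]; exact hlast
      rw [e, hf]
    have herase : (remOf sp parent).eraseIdx (tw.length - 1) =
        tw.dropLast.map f ++ dw.map f := by
      rw [hremsplit, List.eraseIdx_append_of_lt_length h1]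
      congr 1
      rw [show tw.length - 1 = (List.map f tw).length - 1 from by simp]
      rw [List.eraseIdx_length_sub_one, ← List.map_dropLast]
    have hdlne : ∀ a ∈ tw.dropLast, (!(a == r - 1)) = true := by
      intro a ha
      have := (List.pairwise_append.mp hptw').2.2 _ ha _ (List.mem_singleton_self _)
      rw [hlast] at this
      simp
      omega
    have hnew : remOf sp (parent.set r ((r:Int)-1)) = tw.dropLast.map f ++ dw.map f := by
      have hQ : ∀ i ∈ List.range n,
          (decide (pAt (parent.set r ((r:Int)-1)) (i+1) = ((i:Int)+1))) =
            ((fun i => !(i == r - 1)) i && P i) := by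
        intro i _
        by_cases hir : i = r - 1
        · subst hir
          rw [show r - 1 + 1 = r from by omega]
          rw [pAt_set_self parent r _ (by omega)]
          rw [decide_eq_false (by omega)]
          simp
        · rw [pAt_set_ne parent (i+1) r _ (by omega)]
          simp [hP, hir]
      have hgoal : remOf sp (parent.set r ((r:Int)-1)) =
          ((List.range sp.length).filter
            (fun i => decide (pAt (parent.set r ((r:Int)-1)) (i+1) = ((i:Int)+1)))).map
            (fun i => sp.getD i 0) := rfl
      rw [hgoal, ← hn, ← hf, List.filter_congr (by simpa using hQ), ← List.filter_filter,
          ← hidxs, ← hsplit, List.filter_append]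
      have e1 : tw.filter (fun i => !(i == r - 1)) = tw.dropLast := by
        conv_lhs => rw [← hdec]
        rw [List.filter_append, List.filter_eq_self.mpr hdlne]
        rw [hlast]
        simp
      have e2 : dw.filter (fun i => !(i == r - 1)) = dw :=
        List.filter_eq_self.mpr (fun a ha => by
          have := hdw_ge a ha
          simp
          omega)
      rw [e1, e2, List.map_append]
    rw [hval, herase, hnew]

-- Proof-side names for the two loop bodies (definitionally the ports' lambdas).
def stepA (st : List Int × List Int) (m : Int) : List Int × List Int :=
  let idx : Int := (PySem.List.bisectRight st.1 m : Int) - 1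
  if idx = -1 then (st.1, st.2 ++ [-1])
  else
    match PySem.List.pop? st.1 idx with
    | some r => (r.2, st.2 ++ [r.1])
    | none => (st.1, st.2 ++ [-1])

def stepB (sp : List Int) (st : List Int × List Int) (m : Int) : List Int × List Int :=
  let parent := st.1
  let j : Int := (PySem.List.bisectRight sp m : Int)
  let root := findRootAux parent j parent.length
  let parent := compressAux parent j root parent.length
  if root = 0 then (parent, st.2 ++ [-1])
  else
    let v := PySem.List.pyGetD sp (root - 1) 0
    (PySem.List.pySetD parent root (root - 1), st.2 ++ [v])

theorem concertA_eq (prices max_prices : List Int) :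
    concert_tickets prices max_prices =
      (max_prices.foldl stepA
        (PySem.List.sorted prices (fun x => x) false, ([] : List Int))).2 := rfl

theorem concertB_eq (prices max_prices : List Int) :
    concert_tickets_alt prices max_prices =
      (max_prices.foldl (stepB (PySem.List.sorted prices (fun x => x) false))
        (PySem.List.pyRange 0 (((PySem.List.sorted prices (fun x => x) false).length : Int) + 1) 1,
          ([] : List Int))).2 := rfl

theorem remOf_congr (sp p q : List Int)
    (h : ∀ i : Nat, i ≤ sp.length → (pAt p i = (i:Int) ↔ pAt q i = (i:Int))) :
    remOf sp p = remOf sp q := by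
  unfold remOf
  congr 1
  apply List.filter_congr
  intro a ha
  rw [List.mem_range] at ha
  have h2 := h (a+1) (by omega)
  push_cast at h2
  exact decide_eq_decide.mpr h2

theorem init_pAt (n : Nat) :
    ∀ i : Nat, i ≤ n → pAt (PySem.List.pyRange 0 ((n:Int)+1) 1) i = (i:Int) := by
  intro i hi
  have hlen : (PySem.List.pyRange 0 ((n:Int)+1) 1).length = n + 1 := by
    rw [PySem.List.length_pyRange_one]; omega
  rw [pAt, List.getD_eq_getElem _ _ (by omega), PySem.List.getElem_pyRange_one]
  omega

theorem init_UFInv (n : Nat) : UFInv n (PySem.List.pyRange 0 ((n:Int)+1) 1) := by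
  refine ⟨by rw [PySem.List.length_pyRange_one]; omega, ?_⟩
  intro i hi
  rw [init_pAt n i hi]
  refine ⟨by omega, by omega, ?_⟩
  intro h
  omega

theorem remOf_init (sp : List Int) :
    remOf sp (PySem.List.pyRange 0 ((sp.length:Int)+1) 1) = sp := by
  unfold remOf
  rw [List.filter_eq_self.mpr]
  · apply List.ext_getElem
    · simp
    · intro i h1 h2
      simp only [List.getElem_map, List.getElem_range]
      rw [List.getD_eq_getElem sp 0 (by simpa using h2)]
  · intro a ha
    rw [List.mem_range] at ha
    rw [decide_eq_true_eq, init_pAt sp.length (a+1) (by omega)]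
    push_cast
    ring

theorem loop_sim (sp : List Int) (hsp : sp.Pairwise (· ≤ ·)) :
    ∀ (ms : List Int) (parent remA res : List Int),
      UFInv sp.length parent → remA = remOf sp parent →
      (ms.foldl stepA (remA, res)).2 = (ms.foldl (stepB sp) (parent, res)).2 := by
  intro ms
  induction ms with
  | nil => intro parent remA res _ _; rfl
  | cons m ms ih =>
    intro parent remA res hInv hrem
    simp only [List.foldl_cons]
    have hplen := hInv.1
    have hKn : PySem.List.bisectRight sp m ≤ sp.length :=
      (PySem.List.bisectRight_spec sp m hsp).1
    have h0 : pAt parent 0 = 0 := by obtain ⟨a, b, _⟩ := hInv.2 0 (by omega); omega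
    have hroot : findRootAux parent ((PySem.List.bisectRight sp m : Nat) : Int) parent.length
        = ((muS parent (PySem.List.bisectRight sp m) : Nat) : Int) :=
      findRootAux_eq sp.length parent hInv parent.length _ hKn (by omega)
    obtain ⟨hInvC, hiffC⟩ := compress_spec sp.length (muS parent (PySem.List.bisectRight sp m))
      parent.length (PySem.List.bisectRight sp m) parent hInv hKn (by omega) rfl
    obtain ⟨hzero, hpos⟩ := step_sim sp parent hsp hInv m
    have hqeq : remA = remOf sp (compressAux parent ((PySem.List.bisectRight sp m : Nat) : Int)
        ((muS parent (PySem.List.bisectRight sp m) : Nat) : Int) parent.length) :=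
      hrem.trans (remOf_congr sp _ _ (fun i hi => (hiffC i hi).symm))
    by_cases hr0 : muS parent (PySem.List.bisectRight sp m) = 0
    · -- no affordable ticket
      have hkz : PySem.List.bisectRight remA m = 0 := by rw [hrem]; exact hzero hr0
      have hstepA : stepA (remA, res) m = (remA, res ++ [-1]) := by
        simp only [stepA, hkz]
        norm_num
      have hstepB : stepB sp (parent, res) m =
          (compressAux parent ((PySem.List.bisectRight sp m : Nat) : Int)
            ((muS parent (PySem.List.bisectRight sp m) : Nat) : Int) parent.length,
           res ++ [-1]) := by
        simp only [stepB, hroot]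
        rw [if_pos (by rw [hr0]; norm_num)]
      rw [hstepA, hstepB]
      exact ih _ _ _ hInvC hqeq
    · have hp : 1 ≤ muS parent (PySem.List.bisectRight sp m) := by omega
      obtain ⟨hk1, hpop⟩ := hpos hp
      have hrn : muS parent (PySem.List.bisectRight sp m) ≤ sp.length :=
        le_trans (muS_le parent _) hKn
      have havailP : pAt parent (muS parent (PySem.List.bisectRight sp m)) =
          ((muS parent (PySem.List.bisectRight sp m) : Nat) : Int) := muS_avail parent h0 _
      have hstepA : stepA (remA, res) m =
          (remOf sp (parent.set (muS parent (PySem.List.bisectRight sp m))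
              ((muS parent (PySem.List.bisectRight sp m) : Int) - 1)),
           res ++ [sp.getD (muS parent (PySem.List.bisectRight sp m) - 1) 0]) := by
        simp only [stepA]
        rw [hrem]
        rw [if_neg (by have := hk1; omega)]
        rw [hpop]
      have hqlen : (compressAux parent ((PySem.List.bisectRight sp m : Nat) : Int)
          ((muS parent (PySem.List.bisectRight sp m) : Nat) : Int) parent.length).length =
            sp.length + 1 := hInvC.1
      have hcast : ((muS parent (PySem.List.bisectRight sp m) - 1 : Nat) : Int) =
          ((muS parent (PySem.List.bisectRight sp m) : Nat) : Int) - 1 := by omega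
      have hstepB : stepB sp (parent, res) m =
          ((compressAux parent ((PySem.List.bisectRight sp m : Nat) : Int)
              ((muS parent (PySem.List.bisectRight sp m) : Nat) : Int) parent.length).set
            (muS parent (PySem.List.bisectRight sp m))
            ((muS parent (PySem.List.bisectRight sp m) : Int) - 1),
           res ++ [sp.getD (muS parent (PySem.List.bisectRight sp m) - 1) 0]) := by
        simp only [stepB, hroot]
        rw [if_neg (by omega)]
        rw [show ((muS parent (PySem.List.bisectRight sp m) : Int) - 1) =
            ((muS parent (PySem.List.bisectRight sp m) - 1 : Nat) : Int) from hcast.symm]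
        rw [PySem.List.pyGetD_natCast, PySem.List.pySetD_natCast, hcast]
      have havailQ : pAt (compressAux parent ((PySem.List.bisectRight sp m : Nat) : Int)
          ((muS parent (PySem.List.bisectRight sp m) : Nat) : Int) parent.length)
          (muS parent (PySem.List.bisectRight sp m)) =
          ((muS parent (PySem.List.bisectRight sp m) : Nat) : Int) :=
        (hiffC _ hrn).mpr havailP
      have hInvQ : UFInv sp.length ((compressAux parent ((PySem.List.bisectRight sp m : Nat) : Int)
          ((muS parent (PySem.List.bisectRight sp m) : Nat) : Int) parent.length).set
            (muS parent (PySem.List.bisectRight sp m))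
            ((muS parent (PySem.List.bisectRight sp m) : Int) - 1)) :=
        UFInv_set_used sp.length _ hInvC _ hp hrn havailQ
      have hrel : remOf sp (parent.set (muS parent (PySem.List.bisectRight sp m))
            ((muS parent (PySem.List.bisectRight sp m) : Int) - 1)) =
          remOf sp ((compressAux parent ((PySem.List.bisectRight sp m : Nat) : Int)
              ((muS parent (PySem.List.bisectRight sp m) : Nat) : Int) parent.length).set
            (muS parent (PySem.List.bisectRight sp m))
            ((muS parent (PySem.List.bisectRight sp m) : Int) - 1)) := by
        apply remOf_congr
        intro i hi
        rw [avail_set_used parent _ hp (by omega),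
            avail_set_used _ _ hp (by rw [hqlen]; omega)]
        exact and_congr_left (fun _ => (hiffC i hi).symm)
      rw [hstepA, hstepB]
      exact ih _ _ _ hInvQ hrel

theorem concert_tickets_spec : Claim_equal_concert_tickets := by
  intro prices max_prices _hdom
  show concert_tickets prices max_prices = concert_tickets_alt prices max_prices
  rw [concertA_eq, concertB_eq]
  have hsp : (PySem.List.sorted prices (fun x => x) false).Pairwise (· ≤ ·) :=
    PySem.List.sorted_pairwise prices (fun x => x)
  exact loop_sim _ hsp max_prices _ _ []
    (init_UFInv (PySem.List.sorted prices (fun x => x) false).length)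
    (remOf_init (PySem.List.sorted prices (fun x => x) false)).symm
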